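-- pv_equiv track=rewrite | github.com/DiaSantos/Python-IA | desafio.py | contador_e_juntador
-- ===== SOURCE A (Python) =====
-- def contador_e_juntador(lista_de_resenhas_json):
--     contador_positivo = 0
--     contador_negativo = 0
--     contador_neutro = 0
--
-- # Lista para armazenar as resenhas traduzidas em português
--     resenhas_pt = []
--
--     for resenha in lista_de_resenhas_json:
--         # Conta as avaliações
--         if resenha['avaliacao'] == 'Positiva':
--             contador_positivo += 1
--         elif resenha['avaliacao'] == 'Negativa':
--             contador_negativo += 1
--         else:
--             contador_neutro += 1
--
--         # Adiciona a resenha em português à lista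
--         resenhas_pt.append(resenha['resenha_pt'])
--
--     # Junta todas as resenhas traduzidas com o separador "#####"
--     textos_unidos = "#####".join(resenhas_pt)
--
--     return contador_positivo, contador_negativo, contador_neutro, textos_unidos
-- ===== SOURCE B (Python) =====
-- def contador_e_juntador(lista_de_resenhas_json):
--     avaliacoes = [r['avaliacao'] for r in lista_de_resenhas_json]
--     contador_positivo = avaliacoes.count('Positiva')
--     contador_negativo = avaliacoes.count('Negativa')
--     contador_neutro = len(lista_de_resenhas_json) - contador_positivo - contador_negativo
--     textos_unidos = "#####".join(r['resenha_pt'] for r in lista_de_resenhas_json)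
--     return contador_positivo, contador_negativo, contador_neutro, textos_unidos
-- ===== Notes on version B (the rewrite author's own statement) =====
-- stated objective: idiomatic
-- what changed: Replaces the fused per-element three-way branch loop and manual append list by a count-then-derive decomposition: count 'Positiva' and 'Negativa' over the extracted labels, obtain neutro by subtraction from the length, and join the translations with a generator expression.
import Mathlib
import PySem

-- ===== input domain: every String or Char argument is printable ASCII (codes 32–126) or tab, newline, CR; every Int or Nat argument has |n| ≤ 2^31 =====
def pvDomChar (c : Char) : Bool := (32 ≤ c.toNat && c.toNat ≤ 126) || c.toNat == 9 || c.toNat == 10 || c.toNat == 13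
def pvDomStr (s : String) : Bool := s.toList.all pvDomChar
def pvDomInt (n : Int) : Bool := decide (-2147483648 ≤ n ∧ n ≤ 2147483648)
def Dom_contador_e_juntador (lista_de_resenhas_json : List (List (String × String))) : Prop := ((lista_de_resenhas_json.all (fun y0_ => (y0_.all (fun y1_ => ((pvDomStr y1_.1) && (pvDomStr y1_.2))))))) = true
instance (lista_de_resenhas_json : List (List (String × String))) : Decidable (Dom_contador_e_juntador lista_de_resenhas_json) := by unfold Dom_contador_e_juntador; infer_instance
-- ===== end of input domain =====

-- B differs from A by a count-then-derive decomposition: count the two labels, get neutro by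
-- subtraction from the length, and join the translations extracted in a separate pass.

-- dict lookup r[k] (first match in the association list); "" only outside Pre_ (Python: KeyError)
def pyLookD (d : List (String × String)) (k : String) : String :=
  ((d.find? (fun p => p.1 == k)).map (·.2)).getD ""

-- ===== PORT A =====
-- loop body of A: the three-way branch on the label, then append the translation
def stepA (st : Int × Int × Int × List String) (resenha : List (String × String)) : Int × Int × Int × List String :=
  let st' :=
    if pyLookD resenha "avaliacao" == "Positiva" then (st.1 + 1, st.2.1, st.2.2.1, st.2.2.2)
    else if pyLookD resenha "avaliacao" == "Negativa" then (st.1, st.2.1 + 1, st.2.2.1, st.2.2.2)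
    else (st.1, st.2.1, st.2.2.1 + 1, st.2.2.2)
  (st'.1, st'.2.1, st'.2.2.1, st'.2.2.2 ++ [pyLookD resenha "resenha_pt"])

def contador_e_juntador (lista_de_resenhas_json : List (List (String × String))) : Int × Int × Int × String :=
  let s := lista_de_resenhas_json.foldl stepA (0, 0, 0, [])
  (s.1, s.2.1, s.2.2.1, PySem.Str.join "#####" s.2.2.2)

-- ===== PORT B =====
def contador_e_juntador_alt (lista_de_resenhas_json : List (List (String × String))) : Int × Int × Int × String :=
  let avaliacoes := lista_de_resenhas_json.map (fun r => pyLookD r "avaliacao")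
  let contador_positivo : Int := PySem.List.count avaliacoes "Positiva"
  let contador_negativo : Int := PySem.List.count avaliacoes "Negativa"
  let contador_neutro : Int := (lista_de_resenhas_json.length : Int) - contador_positivo - contador_negativo
  let textos_unidos := PySem.Str.join "#####" (lista_de_resenhas_json.map (fun r => pyLookD r "resenha_pt"))
  (contador_positivo, contador_negativo, contador_neutro, textos_unidos)

-- ===== PRECONDITION & SPEC =====
-- Pre_: every review dict carries both keys 'avaliacao' and 'resenha_pt'; otherwise A raises KeyError.
def Pre_contador_e_juntador (lista_de_resenhas_json : List (List (String × String))) : Prop :=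
  (lista_de_resenhas_json.all (fun d =>
    d.any (fun p => p.1 == "avaliacao") && d.any (fun p => p.1 == "resenha_pt"))) = true
instance (lista_de_resenhas_json : List (List (String × String))) : Decidable (Pre_contador_e_juntador lista_de_resenhas_json) := by unfold Pre_contador_e_juntador; infer_instance
def pvWitness_contador_e_juntador : (List (List (String × String))) :=
  [[("avaliacao", "Positiva"), ("resenha_pt", "bom")], [("avaliacao", "Neutra"), ("resenha_pt", "ok")]]
def Spec_contador_e_juntador (lista_de_resenhas_json : List (List (String × String))) (out : Int × Int × Int × String) : Prop := out = contador_e_juntador_alt lista_de_resenhas_json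
instance (lista_de_resenhas_json : List (List (String × String))) (out : Int × Int × Int × String) : Decidable (Spec_contador_e_juntador lista_de_resenhas_json out) := by unfold Spec_contador_e_juntador; infer_instance

-- ===== CLAIM (what is proved, stated in full; the proofs are below) =====
def Claim_equal_contador_e_juntador : Prop := ∀ (lista_de_resenhas_json : List (List (String × String))), Dom_contador_e_juntador lista_de_resenhas_json → Pre_contador_e_juntador lista_de_resenhas_json → Spec_contador_e_juntador lista_de_resenhas_json (contador_e_juntador lista_de_resenhas_json)

-- ===== LEMMAS AND PROOFS =====

-- A's loop computes base counts plus label counts, and appends the translations in order.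
theorem contador_loop (l : List (List (String × String))) (p n z : Int) (acc : List String) :
    l.foldl stepA (p, n, z, acc) =
    (p + ((l.map (fun r => pyLookD r "avaliacao")).count "Positiva" : Int),
     n + ((l.map (fun r => pyLookD r "avaliacao")).count "Negativa" : Int),
     z + ((l.map (fun r => pyLookD r "avaliacao")).countP
            (fun a => !(a == "Positiva") && !(a == "Negativa")) : Int),
     acc ++ l.map (fun r => pyLookD r "resenha_pt")) := by
  induction l generalizing p n z acc with
  | nil => simp
  | cons r t ih =>
    rw [List.foldl_cons]
    by_cases hp : pyLookD r "avaliacao" = "Positiva"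
    · have hs : stepA (p, n, z, acc) r
          = (p + 1, n, z, acc ++ [pyLookD r "resenha_pt"]) := by simp [stepA, hp]
      rw [hs, ih]
      refine Prod.ext ?_ (Prod.ext ?_ (Prod.ext ?_ ?_)) <;>
        simp [List.count_cons, List.countP_cons, hp] <;> omega
    · by_cases hn : pyLookD r "avaliacao" = "Negativa"
      · have hs : stepA (p, n, z, acc) r
            = (p, n + 1, z, acc ++ [pyLookD r "resenha_pt"]) := by simp [stepA, hp, hn]
        rw [hs, ih]
        refine Prod.ext ?_ (Prod.ext ?_ (Prod.ext ?_ ?_)) <;>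
          simp [List.count_cons, List.countP_cons, hp, hn] <;> omega
      · have hs : stepA (p, n, z, acc) r
            = (p, n, z + 1, acc ++ [pyLookD r "resenha_pt"]) := by simp [stepA, hp, hn]
        rw [hs, ih]
        refine Prod.ext ?_ (Prod.ext ?_ (Prod.ext ?_ ?_)) <;>
          simp [List.count_cons, List.countP_cons, hp, hn] <;> omega

-- the three label classes partition the list
theorem count_partition (l : List String) :
    (l.count "Positiva" : Int) + (l.count "Negativa" : Int)
      + (l.countP (fun a => !(a == "Positiva") && !(a == "Negativa")) : Int)
      = (l.length : Int) := by
  induction l with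
  | nil => simp
  | cons a t ih =>
    by_cases hp : a = "Positiva"
    · simp only [List.count_cons, List.countP_cons, hp]; simp; omega
    · by_cases hn : a = "Negativa"
      · simp only [List.count_cons, List.countP_cons]; simp [hp, hn]; omega
      · simp only [List.count_cons, List.countP_cons]; simp [hp, hn]; omega

-- ===== VERDICT (by name: the statement is the Claim_ definition above) =====
theorem contador_e_juntador_spec : Claim_equal_contador_e_juntador := by
  intro l _ _
  show _ = _
  simp only [contador_e_juntador, contador_e_juntador_alt, contador_loop, PySem.List.count_eq]
  have h := count_partition (l.map (fun r => pyLookD r "avaliacao"))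
  simp only [List.length_map, List.countP_map] at h
  refine Prod.ext ?_ (Prod.ext ?_ (Prod.ext ?_ ?_)) <;> simp [List.countP_map] <;> omega
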